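-- pv_equiv track=rewrite | github.com/sidan54/NLP_Information_Retrieval | util.py | get_vocab
-- ===== SOURCE A (Python) =====
-- def get_vocab(docs):
--     seen = {}
--     counter = 1
--     for doc in docs:
--         for sentence in doc:
--             for word in sentence:
--                 if word not in seen:
--                     seen[word] = counter
--                     counter+=1
--     return seen,len(seen)
-- ===== SOURCE B (Python) =====
-- def get_vocab(docs):
--     # Flatten once.
--     words = [w for doc in docs for sentence in doc for w in sentence]
--     # Map each word to its FIRST position by sweeping backwards: later
--     # (i.e. earlier-position) writes overwrite, no membership test needed.
--     first = {}
--     for i, w in reversed(list(enumerate(words))):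
--         first[w] = i
--     # Distinct words sorted by first-occurrence position get ids 1..n.
--     order = sorted(first, key=first.__getitem__)
--     vocab = {w: rank for rank, w in enumerate(order, 1)}
--     return vocab, len(vocab)
-- ===== Notes on version B (the rewrite author's own statement) =====
-- stated objective: alternative
-- what changed: Replaces A's single-pass membership-check-and-counter loop by a sort-based algorithm: a backward overwrite sweep records each word's first position without any membership test, then the distinct words are sorted by that position and ids assigned by rank.
import Mathlib
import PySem

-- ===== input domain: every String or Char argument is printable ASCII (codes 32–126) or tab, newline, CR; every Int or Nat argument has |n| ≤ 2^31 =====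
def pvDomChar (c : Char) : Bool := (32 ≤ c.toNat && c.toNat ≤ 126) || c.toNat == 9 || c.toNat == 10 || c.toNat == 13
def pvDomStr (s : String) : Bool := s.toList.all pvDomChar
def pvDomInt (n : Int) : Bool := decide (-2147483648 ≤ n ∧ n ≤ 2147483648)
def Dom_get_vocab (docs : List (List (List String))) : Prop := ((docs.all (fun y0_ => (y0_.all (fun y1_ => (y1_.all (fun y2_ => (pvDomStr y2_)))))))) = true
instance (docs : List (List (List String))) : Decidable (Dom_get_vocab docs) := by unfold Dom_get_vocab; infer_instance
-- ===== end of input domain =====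

-- B replaces A's single-pass membership-check-and-counter loop by a sort-based
-- algorithm (backward overwrite sweep for first positions, then sort by position).

-- ===== PORT A =====
-- the inner loop body: 'if word not in seen: seen[word] = counter; counter += 1'
def pvStepA (st : PySem.Dict String Int × Int) (word : String) : PySem.Dict String Int × Int :=
  if st.1.contains word then st else (st.1.insert word st.2, st.2 + 1)

def get_vocab (docs : List (List (List String))) : (List (String × Int)) × Int :=
  let st := docs.foldl (fun st doc =>
    doc.foldl (fun st sentence =>
      sentence.foldl pvStepA st) st) (PySem.Dict.empty, 1)
  (st.1.items, (st.1.size : Int))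

-- ===== PORT B =====
def get_vocab_alt (docs : List (List (List String))) : (List (String × Int)) × Int :=
  let words := docs.flatMap (fun doc => doc.flatMap (fun sentence => sentence))
  -- 'for i, w in reversed(list(enumerate(words))): first[w] = i'
  let first := ((PySem.List.enumerate words 0).reverse).foldl
      (fun d p => d.insert p.2 p.1) (PySem.Dict.empty : PySem.Dict String Int)
  -- 'sorted(first, key=first.__getitem__)'
  let order := PySem.List.sorted first.keys (fun w => first.getD w 0) false
  -- '{w: rank for rank, w in enumerate(order, 1)}'
  let vocab := (PySem.List.enumerate order 1).map (fun p => (p.2, p.1))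
  (vocab, (vocab.length : Int))

-- ===== PRECONDITION & SPEC =====
def Spec_get_vocab (docs : List (List (List String))) (out : (List (String × Int)) × Int) : Prop := out = get_vocab_alt docs
instance (docs : List (List (List String))) (out : (List (String × Int)) × Int) : Decidable (Spec_get_vocab docs out) := by unfold Spec_get_vocab; infer_instance

-- ===== CLAIM (what is proved, stated in full; the proofs are below) =====
def Claim_equal_get_vocab : Prop := ∀ (docs : List (List (List String))), Dom_get_vocab docs → Spec_get_vocab docs (get_vocab docs)

-- ===== LEMMAS AND PROOFS =====

-- first-occurrence enumeration of a word list, shared target of both sides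
def pvVocab (u : List String) : List (String × Int) :=
  (PySem.List.enumerate u 1).map (fun p => (p.2, p.1))

lemma pvVocab_append_singleton (u : List String) (w : String) :
    pvVocab (u ++ [w]) = pvVocab u ++ [(w, (u.length : Int) + 1)] := by
  simp [pvVocab, PySem.List.enumerate_append, PySem.List.enumerate_cons]
  ring_nf

lemma pvVocab_keys (u : List String) :
    (PySem.Dict.mk (pvVocab u)).keys = u := by
  simp [pvVocab, PySem.Dict.keys, List.map_map, Function.comp_def,
    PySem.List.map_snd_enumerate]

-- A's triple nested loop is the flat fold over all words
lemma foldA_flat (docs : List (List (List String))) (init : PySem.Dict String Int × Int) :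
    docs.foldl (fun st doc => doc.foldl (fun st sentence => sentence.foldl pvStepA st) st) init
      = (docs.flatMap (fun doc => doc.flatMap (fun sentence => sentence))).foldl pvStepA init := by
  induction docs generalizing init with
  | nil => rfl
  | cons d ds ih =>
    simp only [List.foldl_cons, List.flatMap_cons, List.foldl_append, ih]
    congr 1
    induction d generalizing init with
    | nil => rfl
    | cons s ss ih2 => simp only [List.foldl_cons, List.flatMap_cons, List.foldl_append, ih2]

-- A's flat fold from the empty state is the first-occurrence enumeration
lemma foldA_eq (ws : List String) :
    ws.foldl pvStepA (PySem.Dict.empty, 1)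
      = (PySem.Dict.mk (pvVocab (PySem.Set.ofList ws)), ((PySem.Set.ofList ws).length : Int) + 1) := by
  induction ws using List.reverseRecOn with
  | nil => rfl
  | append_singleton ws w ih =>
    rw [List.foldl_append, List.foldl_cons, List.foldl_nil, ih, PySem.Set.ofList_append_singleton]
    have hkeys := pvVocab_keys (PySem.Set.ofList ws)
    by_cases hmem : w ∈ PySem.Set.ofList ws
    · rw [PySem.Set.add_of_mem hmem]
      have hc : (PySem.Dict.mk (pvVocab (PySem.Set.ofList ws))).contains w = true := by
        rw [PySem.Dict.contains_iff_mem_keys, hkeys]; exact hmem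
      simp only [pvStepA, hc, if_true]
    · rw [PySem.Set.add_of_not_mem hmem]
      have hc : (PySem.Dict.mk (pvVocab (PySem.Set.ofList ws))).contains w = false := by
        rw [Bool.eq_false_iff]
        intro h
        exact hmem (by rwa [PySem.Dict.contains_iff_mem_keys, hkeys] at h)
      simp only [pvStepA, hc, Bool.false_eq_true, if_false]
      refine Prod.ext ?_ ?_
      · apply PySem.Dict.ext
        rw [PySem.Dict.items_insert]
        simp only [hc, Bool.false_eq_true, if_false, pvVocab_append_singleton]
      · show ((PySem.Set.ofList ws).length : Int) + 1 + 1 = ((PySem.Set.ofList ws ++ [w]).length : Int) + 1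
        simp

-- B's backward sweep: peel one word off the front
lemma sweep_cons (a : String) (l : List String) (s : Int) (d : PySem.Dict String Int) :
    ((PySem.List.enumerate (a :: l) s).reverse).foldl (fun d p => d.insert p.2 p.1) d
      = (((PySem.List.enumerate l (s + 1)).reverse).foldl (fun d p => d.insert p.2 p.1) d).insert a s := by
  rw [PySem.List.enumerate_cons, List.reverse_cons, List.foldl_append]
  rfl

-- B's backward sweep records first positions
lemma sweep_get? (l : List String) (s : Int) (d : PySem.Dict String Int) (w : String) :
    (((PySem.List.enumerate l s).reverse).foldl (fun d p => d.insert p.2 p.1) d).get? w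
      = if w ∈ l then some (s + (l.idxOf w : Int)) else d.get? w := by
  induction l generalizing s d with
  | nil => simp [PySem.List.enumerate_nil]
  | cons a l ih =>
    rw [sweep_cons, PySem.Dict.get?_insert, ih]
    by_cases hwa : w = a
    · subst hwa; simp [List.idxOf_cons_eq _ rfl]
    · simp only [List.mem_cons, hwa, false_or]
      by_cases hw : w ∈ l
      · rw [if_pos hw, if_pos hw, List.idxOf_cons_ne _ (Ne.symm hwa)]
        push_cast; ring_nf
      · simp [hw]

-- B's backward sweep's keys: the distinct words (in reverse-first order)
lemma sweep_keys (l : List String) (s : Int) :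
    (((PySem.List.enumerate l s).reverse).foldl (fun d p => d.insert p.2 p.1)
        (PySem.Dict.empty : PySem.Dict String Int)).keys
      = PySem.Set.ofList l.reverse := by
  induction l generalizing s with
  | nil => rfl
  | cons a l ih =>
    rw [sweep_cons, List.reverse_cons, PySem.Set.ofList_append_singleton]
    by_cases h : a ∈ PySem.Set.ofList l.reverse
    · have hc : ((PySem.List.enumerate l (s + 1)).reverse.foldl (fun d p => d.insert p.2 p.1)
          (PySem.Dict.empty : PySem.Dict String Int)).contains a = true := by
        rw [PySem.Dict.contains_iff_mem_keys, ih]; exact h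
      rw [PySem.Dict.keys_insert_of_contains _ _ hc, ih, PySem.Set.add_of_mem h]
    · have hc : ((PySem.List.enumerate l (s + 1)).reverse.foldl (fun d p => d.insert p.2 p.1)
          (PySem.Dict.empty : PySem.Dict String Int)).contains a = false := by
        rw [Bool.eq_false_iff]
        intro hc
        exact h (by rwa [PySem.Dict.contains_iff_mem_keys, ih] at hc)
      rw [PySem.Dict.keys_insert_of_not_contains _ _ hc, ih, PySem.Set.add_of_not_mem h]

-- first occurrences are strictly increasing along the ordered dedup
lemma pairwise_idxOf (ws : List String) :
    (PySem.Set.ofList ws).Pairwise (fun a b => ws.idxOf a < ws.idxOf b) := by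
  induction ws using List.reverseRecOn with
  | nil => simp [PySem.Set.ofList]
  | append_singleton ws w ih =>
    rw [PySem.Set.ofList_append_singleton]
    have hsub : ∀ a ∈ PySem.Set.ofList ws, a ∈ ws := fun a ha => (PySem.Set.mem_ofList ws a).1 ha
    by_cases hmem : w ∈ PySem.Set.ofList ws
    · rw [PySem.Set.add_of_mem hmem]
      exact ih.imp_of_mem (fun {a b} ha hb h => by
        rwa [List.idxOf_append_of_mem (hsub a ha), List.idxOf_append_of_mem (hsub b hb)])
    · rw [PySem.Set.add_of_not_mem hmem]
      have hw : w ∉ ws := fun h => hmem ((PySem.Set.mem_ofList ws w).2 h)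
      rw [List.pairwise_append]
      refine ⟨ih.imp_of_mem (fun {a b} ha hb h => by
        rwa [List.idxOf_append_of_mem (hsub a ha), List.idxOf_append_of_mem (hsub b hb)]),
        List.pairwise_singleton _ _, ?_⟩
      intro a ha b hb
      rw [List.mem_singleton] at hb
      rw [hb, List.idxOf_append_of_mem (hsub a ha), List.idxOf_append_of_notMem hw]
      calc ws.idxOf a < ws.length := List.idxOf_lt_length_iff.2 (hsub a ha)
        _ ≤ ws.length + List.idxOf w [w] := Nat.le_add_right _ _

-- B's sorted order is exactly the first-occurrence dedup
lemma order_eq (ws : List String) :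
    PySem.List.sorted
      (((PySem.List.enumerate ws 0).reverse).foldl (fun d p => d.insert p.2 p.1)
          (PySem.Dict.empty : PySem.Dict String Int)).keys
      (fun w => (((PySem.List.enumerate ws 0).reverse).foldl (fun d p => d.insert p.2 p.1)
          (PySem.Dict.empty : PySem.Dict String Int)).getD w 0) false
      = PySem.Set.ofList ws := by
  have hget : ∀ w ∈ ws,
      (((PySem.List.enumerate ws 0).reverse).foldl (fun d p => d.insert p.2 p.1)
          (PySem.Dict.empty : PySem.Dict String Int)).getD w 0 = (ws.idxOf w : Int) := by
    intro w hw
    rw [PySem.Dict.getD_eq_get?_getD, sweep_get? ws 0 _ w, if_pos hw]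
    simp
  have hperm : (PySem.Set.ofList ws).Perm
      (((PySem.List.enumerate ws 0).reverse).foldl (fun d p => d.insert p.2 p.1)
          (PySem.Dict.empty : PySem.Dict String Int)).keys := by
    rw [sweep_keys]
    rw [List.perm_ext_iff_of_nodup (PySem.Set.nodup_ofList _) (PySem.Set.nodup_ofList _)]
    intro a
    simp [PySem.Set.mem_ofList]
  have hpw : (PySem.Set.ofList ws).Pairwise (fun a b =>
      (((PySem.List.enumerate ws 0).reverse).foldl (fun d p => d.insert p.2 p.1)
          (PySem.Dict.empty : PySem.Dict String Int)).getD a 0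
        < (((PySem.List.enumerate ws 0).reverse).foldl (fun d p => d.insert p.2 p.1)
          (PySem.Dict.empty : PySem.Dict String Int)).getD b 0) := by
    refine (pairwise_idxOf ws).imp_of_mem (fun {a b} ha hb h => ?_)
    rw [hget a ((PySem.Set.mem_ofList ws a).1 ha), hget b ((PySem.Set.mem_ofList ws b).1 hb)]
    exact_mod_cast h
  exact PySem.List.sorted_eq_of_perm_of_pairwise_lt _ _ _ hperm hpw

-- ===== VERDICT (by name: the statement is the Claim_ definition above) =====
theorem get_vocab_spec : Claim_equal_get_vocab := by
  intro docs _
  show get_vocab docs = get_vocab_alt docs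
  simp only [get_vocab, get_vocab_alt, foldA_flat, foldA_eq, order_eq]
  simp [pvVocab, PySem.Dict.size, PySem.List.length_enumerate]
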